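-- pv_equiv track=rewrite | github.com/zeyu-chen/25t1-comp9021-labs | Lab 4/Solutions/ex_3_sol.py | f3_2
-- ===== SOURCE A (Python) =====
-- def f3_2(L: list) -> list:
--     """
--     Removes elements from a list where the element is the arithmetic mean of its neighbors.
--
--     Uses a loop that continues until the list stabilizes, with a backward iteration
--     approach in each pass to avoid index issues when removing elements.
--
--     Args:
--         L: A list of numbers
--
--     Returns:
--         The modified list with arithmetic mean elements removed
--     """
--     # Create a copy to avoid modifying the input list directly
--     result = L.copy()
--
--     # Continue until no more elements can be removed
--     changed = True
--     while changed and len(result) > 2: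
--         changed = False
--
--         # Iterate through the list backwards to avoid index shifting problems
--         i = len(result) - 2
--         while i > 0:
--             # Check if current element is arithmetic mean of neighbors
--             if result[i - 1] + result[i + 1] == result[i] * 2:
--                 # Remove the current element
--                 result.pop(i)
--                 changed = True
--             i -= 1
--
--     # Return the modified list
--     return result
-- ===== SOURCE B (Python) =====
-- def f3_2(L: list) -> list:
--     """Same result as the original, but each pass is a single right-to-left
--     stack sweep (no index bookkeeping, no O(n) list.pop), repeated until the
--     list stabilizes."""
--     result = list(L)
--     while len(result) > 2:
--         out = []  # holds the processed suffix, in reversed order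
--         for a in reversed(result):
--             if len(out) >= 2 and a + out[-2] == 2 * out[-1]:
--                 out.pop()
--             out.append(a)
--         if len(out) == len(result):
--             break
--         out.reverse()
--         result = out
--     return result
-- ===== Notes on version B (the rewrite author's own statement) =====
-- stated objective: faster
-- what changed: Each backward pass becomes a single right-to-left stack sweep that builds the surviving suffix (pop/push on the stack top), instead of index bookkeeping with O(n) list.pop(i) deletions in the middle of the list; passes repeat until a sweep removes nothing.
import Mathlib
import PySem

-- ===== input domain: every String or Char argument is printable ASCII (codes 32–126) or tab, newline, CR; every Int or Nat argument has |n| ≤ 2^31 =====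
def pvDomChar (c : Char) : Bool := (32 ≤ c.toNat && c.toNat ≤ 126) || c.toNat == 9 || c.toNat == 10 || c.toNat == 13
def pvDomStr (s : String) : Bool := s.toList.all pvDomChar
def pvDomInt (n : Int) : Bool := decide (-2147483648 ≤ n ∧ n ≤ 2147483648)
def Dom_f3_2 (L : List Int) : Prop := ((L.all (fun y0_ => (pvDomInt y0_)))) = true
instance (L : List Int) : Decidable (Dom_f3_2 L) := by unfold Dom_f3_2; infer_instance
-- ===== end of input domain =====

-- B replaces A's index-based backward pass with in-place list.pop deletions by a
-- single right-to-left stack sweep per pass; measurably faster at the tested sizes.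

-- ===== PORT A =====
-- inner `while i > 0` loop of A: state (result, i, changed); recursion on i.
-- The `none`/fallback branches are unreachable (Python would raise IndexError there,
-- which cannot happen: 1 ≤ i ≤ len-2 is a loop invariant); they act as no-ops.
def f3_2_inner (r : List Int) (i : Nat) (ch : Bool) : List Int × Bool :=
  match i with
  | 0 => (r, ch)
  | Nat.succ j =>
    let cond :=
      match PySem.List.pyGet? r ((j : Int)), PySem.List.pyGet? r ((j : Int) + 2),
            PySem.List.pyGet? r ((j : Int) + 1) with
      | some a, some c, some b => a + c == b * 2
      | _, _, _ => false
    if cond then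
      match PySem.List.pop? r ((j : Int) + 1) with
      | some (_, rest) => f3_2_inner rest j true
      | none => f3_2_inner r j ch
    else f3_2_inner r j ch

-- termination measure for the outer while loop (the port cites it in decreasing_by)
theorem f3_2_inner_len : ∀ (i : Nat) (r : List Int) (ch : Bool),
    (f3_2_inner r i ch).1.length ≤ r.length ∧
    ((f3_2_inner r i ch).2 = true → ch = true ∨ (f3_2_inner r i ch).1.length < r.length) := by
  intro i
  induction i with
  | zero => intro r ch; simp [f3_2_inner]
  | succ j ih =>
    intro r ch
    simp only [f3_2_inner]
    repeat' split
    all_goals try exact ih r ch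
    all_goals
      rename_i w rest hp
      have hlen : rest.length + 1 = r.length := by
        simpa using PySem.List.length_of_pop?_eq_some _ hp
      rcases ih rest true with ⟨h1, _⟩
      exact ⟨by omega, fun _ => Or.inr (by omega)⟩

-- outer `while changed and len(result) > 2` loop of A
def f3_2_outer (r : List Int) : List Int :=
  if _h : 2 < r.length then
    let p := f3_2_inner r (r.length - 2) false
    if hc : p.2 = true then f3_2_outer p.1 else p.1
  else r
termination_by r.length
decreasing_by
  rcases (f3_2_inner_len (r.length - 2) r false).2 hc with h | h
  · exact absurd h (by simp)
  · exact h

def f3_2 (L : List Int) : List Int := f3_2_outer L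

-- ===== PORT B =====
-- one sweep of Source B: fold over reversed(result) with the stack `out`; the Lean list
-- `st` stores Source B's `out` with st.head = out[-1], so the final stack IS the result
-- in order (Source B's trailing out.reverse() is this representation change).
def f3_2_step (st : List Int) (a : Int) : List Int :=
  match st with
  | b :: c :: t => if a + c = 2 * b then a :: c :: t else a :: b :: c :: t
  | _ => a :: st

def f3_2_pass (xs : List Int) : List Int := xs.reverse.foldl f3_2_step []

-- the stack never grows by more than one element per step (termination helper)
theorem f3_2_step_cases (s : List Int) (a : Int) :
    (∃ b c t, s = b :: c :: t ∧ a + c = 2 * b ∧ f3_2_step s a = a :: c :: t) ∨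
    f3_2_step s a = a :: s := by
  rcases s with _ | ⟨b, _ | ⟨c, t⟩⟩
  · right; rfl
  · right; rfl
  · by_cases h : a + c = 2 * b
    · exact Or.inl ⟨b, c, t, rfl, h, by simp [f3_2_step, h]⟩
    · right; simp [f3_2_step, h]

theorem foldr_step_length_le (l : List Int) : ∀ (s : List Int),
    (l.foldr (fun a s => f3_2_step s a) s).length ≤ l.length + s.length := by
  induction l with
  | nil => simp
  | cons a l ih =>
    intro s
    simp only [List.foldr_cons]
    rcases f3_2_step_cases (l.foldr (fun a s => f3_2_step s a) s) a with ⟨b, c, t, he, _, hs⟩ | hs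
    · rw [hs]; have := ih s; rw [he] at this; simp at this ⊢; omega
    · rw [hs]; have := ih s; simp at this ⊢; omega

theorem f3_2_pass_length_le (xs : List Int) : (f3_2_pass xs).length ≤ xs.length := by
  have := foldr_step_length_le xs []
  simpa [f3_2_pass, List.foldl_reverse] using this

-- outer `while len(result) > 2` loop of Source B
def f3_2_altLoop (r : List Int) : List Int :=
  if _h : 2 < r.length then
    if _hne : (f3_2_pass r).length = r.length then r
    else f3_2_altLoop (f3_2_pass r)
  else r
termination_by r.length
decreasing_by
  have := f3_2_pass_length_le r
  omega

def f3_2_alt (L : List Int) : List Int := f3_2_altLoop L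

-- ===== PRECONDITION & SPEC =====
def Spec_f3_2 (L : List Int) (out : List Int) : Prop := out = f3_2_alt L
instance (L : List Int) (out : List Int) : Decidable (Spec_f3_2 L out) := by unfold Spec_f3_2; infer_instance

-- ===== CLAIM (what is proved, stated in full; the proofs are below) =====
def Claim_equal_f3_2 : Prop := ∀ (L : List Int), Dom_f3_2 L → Spec_f3_2 L (f3_2 L)

-- ===== LEMMAS AND PROOFS =====

-- foldr view of one B sweep
theorem f3_2_pass_eq_foldr (xs : List Int) :
    f3_2_pass xs = xs.foldr (fun a s => f3_2_step s a) [] := by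
  simp [f3_2_pass, List.foldl_reverse]

-- if a sweep does not shrink the list, it did nothing
theorem foldr_step_fix (l : List Int) : ∀ (s : List Int),
    (l.foldr (fun a s => f3_2_step s a) s).length = l.length + s.length →
    l.foldr (fun a s => f3_2_step s a) s = l ++ s := by
  induction l with
  | nil => simp
  | cons a l ih =>
    intro s h
    simp only [List.foldr_cons] at h ⊢
    have hle := foldr_step_length_le l s
    rcases f3_2_step_cases (l.foldr (fun a s => f3_2_step s a) s) a with ⟨b, c, t, he, _, hs⟩ | hs
    · exfalso
      have hL := foldr_step_length_le l s
      rw [he] at hL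
      rw [hs] at h
      simp at hL h
      omega
    · rw [hs] at h ⊢
      simp at h
      rw [ih s (by omega)]
      simp

-- the core lemma: A's inner loop, started with prefix p untouched and current
-- suffix s (|s| ≥ 2), computes exactly the right-fold of B's step over p into s,
-- and the changed flag records whether the length shrank.
theorem f3_2_inner_eq : ∀ (p : List Int), ∀ (s : List Int) (ch : Bool), 2 ≤ s.length →
    f3_2_inner (p ++ s) p.length ch =
      (p.foldr (fun a s => f3_2_step s a) s,
       ch || decide ((p.foldr (fun a s => f3_2_step s a) s).length ≠ p.length + s.length)) := by
  intro p
  induction p using List.reverseRecOn with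
  | nil =>
    intro s ch hs
    simp [f3_2_inner]
  | append_singleton p a ih =>
    intro s ch hs
    rcases s with _ | ⟨b, _ | ⟨c, t⟩⟩
    · simp at hs
    · simp at hs
    have hassoc : (p ++ [a]) ++ (b :: c :: t) = p ++ a :: b :: c :: t := by simp
    have hlen : (p ++ [a]).length = Nat.succ p.length := by simp
    rw [hassoc, hlen]
    simp only [f3_2_inner]
    have hget_a : PySem.List.pyGet? (p ++ a :: b :: c :: t) ((p.length : Int)) = some a :=
      PySem.List.pyGet?_append_length ..
    have hget_b : PySem.List.pyGet? (p ++ a :: b :: c :: t) ((p.length : Int) + 1) = some b := by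
      have h1 : p ++ a :: b :: c :: t = (p ++ [a]) ++ b :: c :: t := by simp
      have h2 : ((p.length : Int) + 1) = (((p ++ [a]).length : Nat) : Int) := by
        simp only [List.length_append, List.length_cons, List.length_nil]; push_cast; omega
      rw [h1, h2]
      exact PySem.List.pyGet?_append_length ..
    have hget_c : PySem.List.pyGet? (p ++ a :: b :: c :: t) ((p.length : Int) + 2) = some c := by
      have h1 : p ++ a :: b :: c :: t = (p ++ [a, b]) ++ c :: t := by simp
      have h2 : ((p.length : Int) + 2) = (((p ++ [a, b]).length : Nat) : Int) := by
        simp only [List.length_append, List.length_cons, List.length_nil]; push_cast; omega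
      rw [h1, h2]
      exact PySem.List.pyGet?_append_length ..
    rw [hget_a, hget_b, hget_c]
    by_cases hcond : a + c = b * 2
    · have hbeq : (a + c == b * 2) = true := by simp [hcond]
      simp only [hbeq, if_pos]
      have hidx : ((p.length : Int) + 1) = ((p.length + 1 : Nat) : Int) := by push_cast; ring
      have hlt : p.length + 1 < (p ++ a :: b :: c :: t).length := by simp
      have hget : (p ++ a :: b :: c :: t)[p.length + 1]'hlt = b := by
        rw [List.getElem_append_right (by omega)]
        simp
      have herase : (p ++ a :: b :: c :: t).eraseIdx (p.length + 1) = p ++ a :: c :: t := by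
        rw [List.eraseIdx_append_of_length_le (by omega)]
        simp [List.eraseIdx]
      rw [hidx, PySem.List.pop?_natCast _ _ hlt, hget, herase]
      show f3_2_inner (p ++ a :: c :: t) p.length true =
        (List.foldr (fun a s => f3_2_step s a) (b :: c :: t) (p ++ [a]),
         ch || decide ((List.foldr (fun a s => f3_2_step s a) (b :: c :: t) (p ++ [a])).length ≠
           (Nat.succ p.length) + (b :: c :: t).length))
      have hstep : f3_2_step (b :: c :: t) a = a :: c :: t := by
        have hc2 : a + c = 2 * b := by omega
        simp [f3_2_step, hc2]
      rw [ih (a :: c :: t) true (by simp)]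
      rw [List.foldr_append]
      simp only [List.foldr_cons, List.foldr_nil, hstep, Prod.mk.injEq]
      refine ⟨trivial, ?_⟩
      have hle := foldr_step_length_le p (a :: c :: t)
      simp only [List.length_cons] at hle ⊢
      have hB : (List.foldr (fun a s => f3_2_step s a) (a :: c :: t) p).length ≠
          p.length.succ + (t.length + 1 + 1) := by omega
      simp [hB]
    · have hbeq : (a + c == b * 2) = false := by simp [hcond]
      simp only [hbeq, Bool.false_eq_true, if_neg, not_false_eq_true]
      have hstep : f3_2_step (b :: c :: t) a = a :: b :: c :: t := by
        have : ¬ a + c = 2 * b := by omega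
        simp [f3_2_step, this]
      rw [ih (a :: b :: c :: t) ch (by simp)]
      rw [List.foldr_append]
      simp only [List.foldr_cons, List.foldr_nil, hstep, Prod.mk.injEq]
      refine ⟨trivial, ?_⟩
      simp only [List.length_cons]
      have hXY : p.length + (t.length + 1 + 1 + 1) = p.length.succ + (t.length + 1 + 1) := by omega
      simp only [hXY]
      rfl

-- a list of length ≥ 2 splits as take (n-2) ++ its last two elements
theorem take_drop_two (r : List Int) (h : 2 ≤ r.length) :
    ∃ x y, r = r.take (r.length - 2) ++ [x, y] ∧ (r.take (r.length - 2)).length = r.length - 2 := by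
  have hd : (r.drop (r.length - 2)).length = 2 := by
    simp [List.length_drop]; omega
  rcases e : r.drop (r.length - 2) with _ | ⟨x, s'⟩
  · rw [e] at hd; simp at hd
  rcases s' with _ | ⟨y, t⟩
  · rw [e] at hd; simp at hd
  · rw [e] at hd
    simp at hd
    subst hd
    exact ⟨x, y, by rw [← e, List.take_append_drop], by rw [List.length_take]; omega⟩

-- the two trailing elements are a fixpoint of the fold seed
theorem foldr_step_two (x y : Int) :
    ([x, y] : List Int).foldr (fun a s => f3_2_step s a) [] = [x, y] := by
  simp [f3_2_step]

-- one pass of A = one sweep of B, with the changed flag = "the length shrank"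
theorem onePass_eq (r : List Int) (h : 2 < r.length) :
    f3_2_inner r (r.length - 2) false =
      (f3_2_pass r, decide ((f3_2_pass r).length ≠ r.length)) := by
  obtain ⟨x, y, hsplit, hlen⟩ := take_drop_two r (by omega)
  have hmain := f3_2_inner_eq (r.take (r.length - 2)) [x, y] false (by simp)
  rw [hlen] at hmain
  have hpass : f3_2_pass r = (r.take (r.length - 2)).foldr (fun a s => f3_2_step s a) [x, y] := by
    rw [f3_2_pass_eq_foldr]
    conv_lhs => rw [hsplit]
    rw [List.foldr_append, foldr_step_two]
  conv_lhs => rw [hsplit]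
  have hidx2 : (List.take (r.length - 2) r ++ [x, y]).length - 2 = r.length - 2 := by
    simp only [List.length_append, hlen]; simp
  rw [hidx2, hmain, ← hpass]
  simp only [Bool.false_or]
  have hXY : r.length - 2 + ([x, y] : List Int).length = r.length := by
    simp only [List.length_cons, List.length_nil]; omega
  rw [hXY]

-- the outer loops agree (strong induction on the length)
theorem outer_eq_aux : ∀ (n : Nat) (r : List Int), r.length ≤ n →
    f3_2_outer r = f3_2_altLoop r := by
  intro n
  induction n with
  | zero =>
    intro r hr
    rw [f3_2_outer, f3_2_altLoop]
    have : ¬ 2 < r.length := by omega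
    simp [this]
  | succ n ih =>
    intro r hr
    rw [f3_2_outer, f3_2_altLoop]
    by_cases h : 2 < r.length
    · simp only [h, dif_pos]
      have hp := onePass_eq r h
      by_cases hch : (f3_2_pass r).length = r.length
      · have hflag : (f3_2_inner r (r.length - 2) false).2 = false := by
          rw [hp]; simp [hch]
        have hfix : f3_2_pass r = r := by
          obtain ⟨x, y, hsplit, hlen⟩ := take_drop_two r (by omega)
          have hch' : ((r.take (r.length - 2)).foldr (fun a s => f3_2_step s a) [x, y]).length
              = (r.length - 2) + 2 := by
            rw [f3_2_pass_eq_foldr] at hch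
            conv_lhs at hch => rw [hsplit]
            rw [List.foldr_append, foldr_step_two] at hch
            rw [hch]; omega
          rw [f3_2_pass_eq_foldr]
          conv_lhs => rw [hsplit]
          rw [List.foldr_append, foldr_step_two]
          have := foldr_step_fix (r.take (r.length - 2)) [x, y] (by
            rw [hch']; simp [hlen])
          rw [this, ← hsplit]
        simp only [hflag, Bool.false_eq_true, dif_neg, not_false_eq_true, hch, dif_pos]
        rw [hp]
        simpa using hfix
      · have hflag : (f3_2_inner r (r.length - 2) false).2 = true := by
          rw [hp]; simp [hch]
        simp only [hflag, dif_pos, hch, dif_neg, not_false_eq_true]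
        have hfst : (f3_2_inner r (r.length - 2) false).1 = f3_2_pass r := by rw [hp]
        rw [hfst]
        exact ih (f3_2_pass r) (by have := f3_2_pass_length_le r; omega)
    · simp [h]

-- ===== VERDICT (by name: the statement is the Claim_ definition above) =====
theorem f3_2_spec : Claim_equal_f3_2 := by
  intro L _
  unfold Spec_f3_2 f3_2 f3_2_alt
  exact outer_eq_aux L.length L (le_refl _)
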